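-- pv_equiv track=rewrite | github.com/Maayan-Sarig/ECE-B.Sc. | Intro_To_CS/Lab 2/Task2.py | internal_check
-- ===== SOURCE A (Python) =====
-- def internal_check(conversation):
--     most_common_letter = "a"
--     number_of_most_common_letter = 0
--     message_counter = 0
--     # creating list of all small letters and set counter to zero
--     # loop that uses Ascii table
--     list_of_letters_and_counters = []
--     for i in range(26):
--         list_of_letters_and_counters.append([chr(i+97), 0])
--     for message in conversation:
--         i = 0
--         flag = True
--         # loop that runs all english small letters and checks if there is a missing letter,
--         # if not increase counter by one
--         while i < 26:
--             if not chr(i+97) in message[2].lower():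
--                 flag = False
--                 break
--             i += 1
--         if flag:
--             message_counter += 1
--         for letter in message[2]:
--             if letter.isalpha():
--                 # handel the case of small letters
--                 if 97 <= ord(letter) <= 122:
--                     list_of_letters_and_counters[ord(letter) - 97][1] += 1
--                 # handel the case of capital letters
--                 else:
--                     list_of_letters_and_counters[ord(letter) - 65][1] += 1
--     for letter_and_counter in list_of_letters_and_counters:
--         if letter_and_counter[1] > number_of_most_common_letter:
--             number_of_most_common_letter = letter_and_counter[1]
--             most_common_letter = letter_and_counter[0]
--     tuple_to_return = (message_counter, most_common_letter, number_of_most_common_letter)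
--     return tuple_to_return
-- ===== SOURCE B (Python) =====
-- def internal_check(conversation):
--     lows = [m[2].lower() for m in conversation]
--     pangrams = sum(1 for low in lows if len({c for c in low if 'a' <= c <= 'z'}) == 26)
--     text = "".join(lows)
--     best_letter, best_count = "a", 0
--     for k in range(26):
--         c = chr(97 + k)
--         n = sum(1 for ch in text if ch == c)
--         if n > best_count:
--             best_letter, best_count = c, n
--     return (pangrams, best_letter, best_count)
-- ===== Notes on version B (the rewrite author's own statement) =====
-- stated objective: alternative
-- what changed: Pangrams are detected by the cardinality of the set of lowercase letters occurring in the message (no 26-iteration membership loop), and instead of maintaining any per-letter tally structure B concatenates all lowered texts once and, for each of the 26 letters, counts its occurrences in that single text while tracking the running maximum.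
import Mathlib
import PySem

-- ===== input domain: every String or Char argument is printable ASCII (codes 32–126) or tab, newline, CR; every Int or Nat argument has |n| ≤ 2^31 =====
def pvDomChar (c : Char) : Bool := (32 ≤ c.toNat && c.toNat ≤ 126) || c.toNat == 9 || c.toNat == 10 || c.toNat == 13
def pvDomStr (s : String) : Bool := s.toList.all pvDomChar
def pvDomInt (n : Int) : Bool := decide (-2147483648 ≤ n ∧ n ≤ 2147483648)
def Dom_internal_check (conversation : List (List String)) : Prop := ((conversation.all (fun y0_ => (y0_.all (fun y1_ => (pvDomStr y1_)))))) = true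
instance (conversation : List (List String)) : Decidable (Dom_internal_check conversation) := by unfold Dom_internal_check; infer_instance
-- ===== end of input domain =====

-- B tests pangrams by the cardinality of the set of lowercase letters present and finds the most
-- common letter by counting each of the 26 letters in the once-concatenated lowered text, with no
-- per-letter tally structure (objective: alternative).

-- ===== PORT A =====
-- the 'while i < 26' pangram loop of A, structural recursion on the remaining fuel 26 - i
def pvA_while (low : List Char) : Nat → Nat → Bool
  | _, 0 => true
  | i, f + 1 =>
    if PySem.Chars.isIn [Char.ofNat (i + 97)] low = false then false
    else pvA_while low (i + 1) f

-- 'list_of_letters_and_counters[idx][1] += 1'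
def pvA_bump (table : List (String × Int)) (idx : Int) : List (String × Int) :=
  let e := PySem.List.pyGetD table idx ("", 0)
  PySem.List.pySetD table idx (e.1, e.2 + 1)

-- the body of 'for letter in message[2]: …'
def pvA_count_step (table : List (String × Int)) (letter : Char) : List (String × Int) :=
  if PySem.Chars.strIsalpha [letter] then
    if 97 ≤ letter.toNat ∧ letter.toNat ≤ 122 then
      pvA_bump table ((letter.toNat : Int) - 97)
    else
      pvA_bump table ((letter.toNat : Int) - 65)
  else table

def internal_check (conversation : List (List String)) : Int × String × Int :=
  let init : List (String × Int) :=
    (PySem.List.pyRange 0 26 1).foldl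
      (fun acc i => acc ++ [(String.ofList [Char.ofNat (i + 97).toNat], (0 : Int))]) []
  let st :=
    conversation.foldl
      (fun (s : Int × List (String × Int)) message =>
        (if pvA_while (PySem.Str.lower (PySem.List.pyGetD message 2 "")).toList 0 26 then s.1 + 1
         else s.1,
         (PySem.List.pyGetD message 2 "").toList.foldl pvA_count_step s.2))
      (0, init)
  let fin :=
    st.2.foldl
      (fun (m : String × Int) lc => if lc.2 > m.2 then (lc.1, lc.2) else m)
      ("a", 0)
  (st.1, fin.1, fin.2)

-- ===== PORT B =====
def internal_check_alt (conversation : List (List String)) : Int × String × Int :=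
  let lows := conversation.map (fun m => PySem.Str.lower (PySem.List.pyGetD m 2 ""))
  let pangrams : Int :=
    lows.foldl
      (fun acc low =>
        acc + (if (PySem.Set.ofList
                    (low.toList.filter (fun c => decide ('a' ≤ c) && decide (c ≤ 'z')))).length = 26
               then 1 else 0))
      0
  let text := (PySem.Str.join "" lows).toList
  let fin :=
    (PySem.List.pyRange 0 26 1).foldl
      (fun (m : String × Int) k =>
        let c := Char.ofNat (97 + k).toNat
        let n : Int := text.foldl (fun s ch => if ch == c then s + 1 else s) 0
        if n > m.2 then (String.ofList [c], n) else m)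
      ("a", 0)
  (pangrams, fin.1, fin.2)

-- ===== PRECONDITION & SPEC =====
-- Pre_ excludes exactly the inputs on which A raises IndexError: a message with fewer than 3 entries.
def Pre_internal_check (conversation : List (List String)) : Prop :=
  ∀ m ∈ conversation, 3 ≤ m.length
instance (conversation : List (List String)) : Decidable (Pre_internal_check conversation) := by
  unfold Pre_internal_check; infer_instance

def pvWitness_internal_check : List (List String) := [["a", "b", "Hello World"]]

def Spec_internal_check (conversation : List (List String)) (out : Int × String × Int) : Prop :=
  out = internal_check_alt conversation
instance (conversation : List (List String)) (out : Int × String × Int) :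
    Decidable (Spec_internal_check conversation out) := by
  unfold Spec_internal_check; infer_instance

-- ===== CLAIM (what is proved, stated in full; the proofs are below) =====
def Claim_equal_internal_check : Prop :=
  ∀ (conversation : List (List String)), Dom_internal_check conversation →
    Pre_internal_check conversation →
    Spec_internal_check conversation (internal_check conversation)

-- ===== LEMMAS AND PROOFS =====

-- ---- character-level facts ----
lemma pvToNat_inj {c d : Char} (h : c.toNat = d.toNat) : c = d := by
  apply Char.ext
  exact UInt32.toNat_inj.mp h

lemma pvToNat_ofNat {n : Nat} (h : n < 55296) : (Char.ofNat n).toNat = n := by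
  rw [Char.toNat_ofNat, if_pos]
  exact Or.inl h

lemma pvChar_eq_iff (c d : Char) : c = d ↔ c.toNat = d.toNat :=
  ⟨fun h => by rw [h], pvToNat_inj⟩

lemma pvIsupper_iff (c : Char) : PySem.Chars.isupper c = true ↔ 65 ≤ c.toNat ∧ c.toNat ≤ 90 := by
  simp [PySem.Chars.isupper, Char.le_def, UInt32.le_iff_toNat_le]

lemma pvIslower_iff (c : Char) : PySem.Chars.islower c = true ↔ 97 ≤ c.toNat ∧ c.toNat ≤ 122 := by
  simp [PySem.Chars.islower, Char.le_def, UInt32.le_iff_toNat_le]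

lemma pvAlpha_iff (c : Char) :
    PySem.Chars.strIsalpha [c] = true ↔ (65 ≤ c.toNat ∧ c.toNat ≤ 90) ∨ (97 ≤ c.toNat ∧ c.toNat ≤ 122) := by
  simp [PySem.Chars.strIsalpha, PySem.Chars.isalpha, pvIsupper_iff, pvIslower_iff]

-- B's lowercase-range test, as a characterisation of the char's code
lemma pvRangeTest_iff (c : Char) :
    (decide ('a' ≤ c) && decide (c ≤ 'z')) = true ↔ 97 ≤ c.toNat ∧ c.toNat ≤ 122 := by
  simp [Char.le_def, UInt32.le_iff_toNat_le]

-- A's letter index (as the Nat it is under the alpha guard)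
def pvIdx (c : Char) : Nat :=
  if 97 ≤ c.toNat ∧ c.toNat ≤ 122 then c.toNat - 97 else c.toNat - 65

lemma pvIdx_lt (c : Char) (h : PySem.Chars.strIsalpha [c] = true) : pvIdx c < 26 := by
  rw [pvAlpha_iff] at h
  unfold pvIdx
  split <;> omega

-- per-character agreement of the two classifications
lemma pvChar_agree (c : Char) (k : Nat) (hk : k < 26) :
    (PySem.Chars.strIsalpha [c] && (pvIdx c == k))
      = (PySem.Chars.strIsalpha [PySem.Chars.lowerChar c]
          && (PySem.Chars.lowerChar c == Char.ofNat (k + 97))) := by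
  have hka : (Char.ofNat (k + 97)).toNat = k + 97 := pvToNat_ofNat (by omega)
  by_cases hu : PySem.Chars.isupper c = true
  · have hr := (pvIsupper_iff c).mp hu
    have hlt : (Char.ofNat (c.toNat + 32)).toNat = c.toNat + 32 := pvToNat_ofNat (by omega)
    have ha : PySem.Chars.strIsalpha [c] = true := (pvAlpha_iff c).mpr (Or.inl hr)
    have hb : PySem.Chars.strIsalpha [Char.ofNat (c.toNat + 32)] = true :=
      (pvAlpha_iff _).mpr (Or.inr (by omega))
    have hidx : pvIdx c = c.toNat - 65 := by unfold pvIdx; split <;> omega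
    simp only [PySem.Chars.lowerChar, hu, if_pos, ha, hb, Bool.true_and, hidx]
    rw [Bool.eq_iff_iff]
    simp only [beq_iff_eq, pvChar_eq_iff, hka, hlt]
    omega
  · simp only [PySem.Chars.lowerChar, hu, Bool.false_eq_true, if_false]
    by_cases ha : PySem.Chars.strIsalpha [c] = true
    · have hr : 97 ≤ c.toNat ∧ c.toNat ≤ 122 := by
        rcases (pvAlpha_iff c).mp ha with h | h
        · exact absurd ((pvIsupper_iff c).mpr h) (by simpa using hu)
        · exact h
      have hidx : pvIdx c = c.toNat - 97 := by unfold pvIdx; split <;> omega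
      simp only [ha, Bool.true_and, hidx]
      rw [Bool.eq_iff_iff]
      simp only [beq_iff_eq, pvChar_eq_iff, hka]
      omega
    · simp [ha]

-- ---- A's counter table ----
def pvCanon (g : Nat → Int) : List (String × Int) :=
  (List.range 26).map (fun k => (String.ofList [Char.ofNat (k + 97)], g k))

lemma pvSet_map_range {β : Type} (f : Nat → β) (n j : Nat) (v : β) (_hj : j < n) :
    ((List.range n).map f).set j v = (List.range n).map (fun k => if k = j then v else f k) := by
  apply List.ext_getElem
  · simp
  · intro i h1 h2
    simp only [List.getElem_set, List.getElem_map, List.getElem_range]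
    split
    · simp_all
    · have : i ≠ j := by omega
      simp [this]

lemma pvInit_eq :
    ((PySem.List.pyRange 0 26 1).foldl
      (fun acc i => acc ++ [(String.ofList [Char.ofNat (i + 97).toNat], (0 : Int))]) [])
      = pvCanon (fun _ => 0) := by
  rw [PySem.List.foldl_append_singleton_eq_map, PySem.List.pyRange_one]
  simp only [List.nil_append, List.map_map, pvCanon]
  apply List.map_congr_left
  intro k _
  simp only [Function.comp, zero_add]
  congr 1

lemma pvBump_canon (g : Nat → Int) (j : Nat) (hj : j < 26) :
    pvA_bump (pvCanon g) ((j : Nat) : Int)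
      = pvCanon (fun k => if k = j then g j + 1 else g k) := by
  unfold pvA_bump pvCanon
  rw [PySem.List.pyGetD_natCast, PySem.List.pySetD_natCast]
  rw [List.getD_eq_getElem?_getD]
  simp only [List.getElem?_map, List.getElem?_range, hj]
  rw [pvSet_map_range _ _ _ _ hj]
  apply List.map_congr_left
  intro k hk
  split <;> simp_all

lemma pvCanon_congr {g1 g2 : Nat → Int} (h : ∀ k, k < 26 → g1 k = g2 k) :
    pvCanon g1 = pvCanon g2 := by
  unfold pvCanon
  apply List.map_congr_left
  intro k hk
  rw [h k (List.mem_range.mp hk)]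

lemma pvStep_canon (g : Nat → Int) (c : Char) :
    pvA_count_step (pvCanon g) c
      = pvCanon (fun k => g k +
          (if PySem.Chars.strIsalpha [c] && (pvIdx c == k) then 1 else 0)) := by
  unfold pvA_count_step
  by_cases ha : PySem.Chars.strIsalpha [c] = true
  · have hlt := pvIdx_lt c ha
    rw [if_pos ha]
    by_cases hb : 97 ≤ c.toNat ∧ c.toNat ≤ 122
    · have hidx : pvIdx c = c.toNat - 97 := by unfold pvIdx; rw [if_pos hb]
      have hcast : ((c.toNat : Int) - 97) = ((c.toNat - 97 : Nat) : Int) := by omega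
      rw [if_pos hb, hcast, pvBump_canon g (c.toNat - 97) (by omega)]
      apply pvCanon_congr
      intro k hk
      by_cases hck : k = pvIdx c
      · simp [ha, hck, hidx]
      · have : ¬ (pvIdx c == k) = true := by simp [beq_iff_eq]; omega
        simp only [hidx] at hck
        simp [ha, hck, this]
    · have hr : 65 ≤ c.toNat ∧ c.toNat ≤ 90 := by
        rcases (pvAlpha_iff c).mp ha with h | h
        · exact h
        · exact absurd h hb
      have hidx : pvIdx c = c.toNat - 65 := by unfold pvIdx; rw [if_neg hb]
      have hcast : ((c.toNat : Int) - 65) = ((c.toNat - 65 : Nat) : Int) := by omega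
      rw [if_neg hb, hcast, pvBump_canon g (c.toNat - 65) (by omega)]
      apply pvCanon_congr
      intro k hk
      by_cases hck : k = pvIdx c
      · simp [ha, hck, hidx]
      · have : ¬ (pvIdx c == k) = true := by simp [beq_iff_eq]; omega
        simp only [hidx] at hck
        simp [ha, hck, this]
  · rw [if_neg ha]
    apply pvCanon_congr
    intro k hk
    simp [ha]

-- A-side count of one raw character list at letter index k
def pvCntA (L : List Char) (k : Nat) : Int :=
  (L.countP (fun c => PySem.Chars.strIsalpha [c] && (pvIdx c == k)) : Int)

lemma pvFold_chars (L : List Char) (g : Nat → Int) :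
    L.foldl pvA_count_step (pvCanon g) = pvCanon (fun k => g k + pvCntA L k) := by
  induction L generalizing g with
  | nil =>
    rw [List.foldl_nil]
    apply pvCanon_congr
    intro k hk
    simp [pvCntA]
  | cons c rest ih =>
    rw [List.foldl_cons, pvStep_canon, ih]
    apply pvCanon_congr
    intro k hk
    simp only [pvCntA, List.countP_cons]
    rw [Nat.cast_add]
    cases (PySem.Chars.strIsalpha [c] && (pvIdx c == k)) with
    | false => simp
    | true => push_cast; ring

lemma pvTable_conv (conv : List (List String)) (g : Nat → Int) :
    conv.foldl (fun t message => (PySem.List.pyGetD message 2 "").toList.foldl pvA_count_step t)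
        (pvCanon g)
      = pvCanon (fun k => g k +
          pvCntA (conv.flatMap (fun message => (PySem.List.pyGetD message 2 "").toList)) k) := by
  induction conv generalizing g with
  | nil =>
    rw [List.foldl_nil]
    apply pvCanon_congr
    intro k hk
    simp [pvCntA]
  | cons m rest ih =>
    rw [List.foldl_cons, pvFold_chars, ih]
    apply pvCanon_congr
    intro k hk
    simp only [pvCntA, List.flatMap_cons, List.countP_append]
    push_cast
    ring

-- the two counts agree letter by letter
lemma pvCnt_agree (L : List Char) (k : Nat) (hk : k < 26) :
    pvCntA L k
      = (((PySem.Chars.lower L).filter (fun c => PySem.Chars.strIsalpha [c])).count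
          (Char.ofNat (k + 97)) : Int) := by
  unfold pvCntA PySem.Chars.lower
  rw [List.count_eq_countP, List.countP_filter, List.countP_map]
  congr 1
  apply List.countP_congr
  intro c _
  simp only [Function.comp]
  rw [pvChar_agree c k hk, Bool.and_comm]

-- dropping the isalpha filter does not change the count of an alphabetic letter
lemma pvCnt_unfiltered (L : List Char) (k : Nat) (hk : k < 26) :
    pvCntA L k = ((PySem.Chars.lower L).count (Char.ofNat (k + 97)) : Int) := by
  rw [pvCnt_agree L k hk]
  congr 1
  apply List.count_filter
  apply (pvAlpha_iff _).mpr
  have := pvToNat_ofNat (n := k + 97) (by omega)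
  omega

-- counts over the whole conversation agree letter by letter
lemma pvCnt_conv (conv : List (List String)) (k : Nat) (hk : k < 26) :
    pvCntA (conv.flatMap (fun message => (PySem.List.pyGetD message 2 "").toList)) k
      = ((conv.flatMap (fun message =>
            PySem.Chars.lower (PySem.List.pyGetD message 2 "").toList)).count
          (Char.ofNat (k + 97)) : Int) := by
  induction conv with
  | nil => simp [pvCntA]
  | cons m rest ih =>
    simp only [List.flatMap_cons, List.count_append]
    have h1 : pvCntA ((PySem.List.pyGetD m 2 "").toList
        ++ rest.flatMap (fun message => (PySem.List.pyGetD message 2 "").toList)) k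
        = pvCntA (PySem.List.pyGetD m 2 "").toList k
          + pvCntA (rest.flatMap (fun message => (PySem.List.pyGetD message 2 "").toList)) k := by
      unfold pvCntA
      rw [List.countP_append]
      push_cast
      ring
    rw [h1, ih, pvCnt_unfiltered _ k hk]
    push_cast
    ring

-- ---- pangram test ----
lemma pvWhile_eq_all (low : List Char) (f i : Nat) :
    pvA_while low i f
      = ((List.range f).map (fun t => Char.ofNat (i + t + 97))).all
          (fun c => PySem.Chars.isIn [c] low) := by
  induction f generalizing i with
  | zero => simp [pvA_while]
  | succ f ih =>
    have hunf : pvA_while low i (f + 1)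
        = if PySem.Chars.isIn [Char.ofNat (i + 97)] low = false then false
          else pvA_while low (i + 1) f := rfl
    rw [hunf, ih (i + 1)]
    rw [List.range_succ_eq_map]
    simp only [List.map_cons, List.map_map, List.all_cons, Nat.add_zero]
    have hmap : (List.range f).map ((fun t => Char.ofNat (i + t + 97)) ∘ Nat.succ)
        = (List.range f).map (fun t => Char.ofNat (i + 1 + t + 97)) := by
      apply List.map_congr_left
      intro t _
      simp only [Function.comp]
      congr 1
      omega
    rw [hmap]
    cases PySem.Chars.isIn [Char.ofNat (i + 97)] low <;> simp

-- the 26 lowercase letters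
def pvAlphaList : List Char := (List.range 26).map (fun k => Char.ofNat (k + 97))

lemma pvAlphaList_nodup : pvAlphaList.Nodup := by decide

lemma pvAlphaList_length : pvAlphaList.length = 26 := by decide

lemma pvMem_alphaList (c : Char) : c ∈ pvAlphaList ↔ 97 ≤ c.toNat ∧ c.toNat ≤ 122 := by
  unfold pvAlphaList
  rw [List.mem_map]
  constructor
  · rintro ⟨k, hk, rfl⟩
    have := pvToNat_ofNat (n := k + 97) (by have := List.mem_range.mp hk; omega)
    have hk' := List.mem_range.mp hk
    omega
  · rintro ⟨h1, h2⟩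
    refine ⟨c.toNat - 97, List.mem_range.mpr (by omega), ?_⟩
    apply pvToNat_inj
    rw [pvToNat_ofNat (by omega)]
    omega

-- A's 26-iteration membership loop IS B's set-cardinality test
lemma pvPangram_eq (low : List Char) :
    pvA_while low 0 26
      = decide ((PySem.Set.ofList
          (low.filter (fun c => decide ('a' ≤ c) && decide (c ≤ 'z')))).length = 26) := by
  set S := PySem.Set.ofList (low.filter (fun c => decide ('a' ≤ c) && decide (c ≤ 'z'))) with hS
  have hSsub : S ⊆ pvAlphaList := by
    intro c hc
    rw [hS, PySem.Set.mem_ofList] at hc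
    have := List.of_mem_filter hc
    rw [pvMem_alphaList]
    exact (pvRangeTest_iff c).mp this
  have hSnodup : S.Nodup := PySem.Set.nodup_ofList _
  have hmemS : ∀ c : Char, c ∈ S ↔ (97 ≤ c.toNat ∧ c.toNat ≤ 122) ∧ c ∈ low := by
    intro c
    rw [hS, PySem.Set.mem_ofList, List.mem_filter, pvRangeTest_iff]
    constructor
    · rintro ⟨h1, h2⟩; exact ⟨h2, h1⟩
    · rintro ⟨h1, h2⟩; exact ⟨h2, h1⟩
  rw [pvWhile_eq_all low 26 0]
  have hall : ((List.range 26).map (fun t => Char.ofNat (0 + t + 97))) = pvAlphaList := by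
    unfold pvAlphaList
    apply List.map_congr_left
    intro t _
    congr 1
    omega
  rw [hall]
  rw [Bool.eq_iff_iff, List.all_eq_true, decide_eq_true_iff]
  constructor
  · intro h
    have hsub2 : pvAlphaList ⊆ S := by
      intro c hc
      have hr := (pvMem_alphaList c).mp hc
      have hin := h c hc
      rw [PySem.Chars.isIn_iff_infix] at hin
      have hmem : c ∈ low := (List.singleton_infix_iff c low).mp hin
      exact (hmemS c).mpr ⟨hr, hmem⟩
    have h1 : pvAlphaList.length ≤ S.length :=
      (List.subperm_of_subset pvAlphaList_nodup hsub2).length_le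
    have h2 : S.length ≤ pvAlphaList.length :=
      (List.subperm_of_subset hSnodup hSsub).length_le
    rw [pvAlphaList_length] at h1 h2
    omega
  · intro hlen c hc
    have hperm : S.Perm pvAlphaList := by
      apply (List.subperm_of_subset hSnodup hSsub).perm_of_length_le
      rw [pvAlphaList_length, hlen]
    have hcS : c ∈ S := hperm.symm.subset hc
    have := ((hmemS c).mp hcS).2
    rw [PySem.Chars.isIn_iff_infix]
    exact (List.singleton_infix_iff c low).mpr this

-- ---- B-side glue ----
-- "".join with the empty separator is flatten
lemma pvJoin_nil (l : List (List Char)) : PySem.Chars.join [] l = l.flatten := by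
  induction l with
  | nil => rfl
  | cons a rest ih =>
    cases rest with
    | nil => simp [PySem.Chars.join_singleton]
    | cons b r => rw [PySem.Chars.join_cons_cons, ih]; simp

lemma pvRange_cast :
    PySem.List.pyRange 0 26 1 = (List.range 26).map (fun (k : Nat) => (k : Int)) := by
  decide

lemma pvFoldl_pyRange26 {β : Type} (f : β → Int → β) (init : β) :
    (PySem.List.pyRange 0 26 1).foldl f init
      = (List.range 26).foldl (fun m k => f m ((k : Nat) : Int)) init := by
  rw [pvRange_cast, List.foldl_map]

-- ===== VERDICT (by name: the statement is the Claim_ definition above) =====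
theorem internal_check_spec : Claim_equal_internal_check := by
  intro conv _ _
  unfold Spec_internal_check internal_check internal_check_alt
  simp only []
  rw [PySem.List.foldl_prod_mk
      (f := fun (mc : Int) (message : List String) =>
        if pvA_while (PySem.Str.lower (PySem.List.pyGetD message 2 "")).toList 0 26 then mc + 1
        else mc)
      (g := fun (t : List (String × Int)) (message : List String) =>
        (PySem.List.pyGetD message 2 "").toList.foldl pvA_count_step t)]
  -- the pangram counters agree
  have hmc : List.foldl (fun mc message =>
        if pvA_while (PySem.Str.lower (PySem.List.pyGetD message 2 "")).toList 0 26 = true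
        then mc + 1 else mc) (0 : Int) conv
      = List.foldl (fun acc low =>
          acc + (if (PySem.Set.ofList
                    (low.toList.filter (fun c => decide ('a' ≤ c) && decide (c ≤ 'z')))).length = 26
                 then 1 else 0)) (0 : Int)
          (conv.map (fun m => PySem.Str.lower (PySem.List.pyGetD m 2 ""))) := by
    rw [List.foldl_map]
    apply PySem.List.foldl_congr_mem
    intro acc message _
    rw [pvPangram_eq]
    simp only [decide_eq_true_eq]
    split_ifs <;> omega
  -- A's final table is the canonical table of letter counts
  have htab : List.foldl
        (fun t message => List.foldl pvA_count_step t (PySem.List.pyGetD message 2 "").toList)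
        (List.foldl (fun acc i => acc ++ [(String.ofList [Char.ofNat (i + 97).toNat], (0 : Int))])
          [] (PySem.List.pyRange 0 26 1)) conv
      = pvCanon (fun k =>
          0 + pvCntA (conv.flatMap (fun message => (PySem.List.pyGetD message 2 "").toList)) k) := by
    rw [pvInit_eq, pvTable_conv]
  -- the count B reads off the joined text is the table entry
  have htext : ((PySem.Str.join ""
        (conv.map (fun m => PySem.Str.lower (PySem.List.pyGetD m 2 "")))).toList)
      = conv.flatMap (fun message => PySem.Chars.lower (PySem.List.pyGetD message 2 "").toList) := by
    rw [PySem.Str.toList_join, show ("" : String).toList = [] from rfl, pvJoin_nil]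
    rw [List.flatMap_def]
    congr 1
    rw [List.map_map]
    apply List.map_congr_left
    intro m _
    simp [Function.comp]
  -- the two max scans agree
  have hfin : List.foldl (fun (m : String × Int) lc => if lc.2 > m.2 then (lc.1, lc.2) else m)
        ("a", 0)
        (pvCanon (fun k =>
          0 + pvCntA (conv.flatMap (fun message => (PySem.List.pyGetD message 2 "").toList)) k))
      = (PySem.List.pyRange 0 26 1).foldl
          (fun (m : String × Int) k =>
            let c := Char.ofNat (97 + k).toNat
            let n : Int := ((PySem.Str.join ""
                (conv.map (fun m => PySem.Str.lower (PySem.List.pyGetD m 2 "")))).toList).foldl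
                (fun s ch => if ch == c then s + 1 else s) 0
            if n > m.2 then (String.ofList [c], n) else m)
          ("a", 0) := by
    rw [pvFoldl_pyRange26]
    unfold pvCanon
    rw [List.foldl_map]
    apply PySem.List.foldl_congr_mem
    intro acc k hkmem
    have hk := List.mem_range.mp hkmem
    have hchr : Char.ofNat (97 + (k : Int)).toNat = Char.ofNat (k + 97) := by
      congr 1
      omega
    simp only [hchr, htext]
    rw [PySem.List.foldl_beq_add_one]
    rw [← pvCnt_conv conv k hk]
  rw [hmc, htab, hfin]
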